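-- pv_equiv track=rewrite | github.com/ejom/VSCodePython | workspace.py | solution
-- ===== SOURCE A (Python) =====
-- def solution(board):
--     #condition to loop until all remaining boxes are either at the bottom or under a box that is either at the bottom or under another box that is eventually at the bottom
--     boxesSettled = False
--     while not boxesSettled:
--         boxesNotSettled = False
--         #Evaluate if the boxes are settled (no boxes can move down anymore (For each box still alive startingf from first box onward, there is no empty spaces at the same index in a future (below) list))
--         for i, row in enumerate(board):
--             for j, space in enumerate(row):
--                 if space == '#':
--                     #need to check each space at current index for future rows
--                     for rowBelow in board[i:]:
--                         if rowBelow[j] == '-':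
--                             boxesNotSettled = True
--         #if the code above is never true (so it never breaks the for loop)
--         if not boxesNotSettled:
--             boxesSettled = True
--         if boxesSettled:
--             break
--
--         #each box moves down a list, staying at the same index within the new list as it was in the previous list
--         explodedSpcs = []
--         for i, row in enumerate(board):
--             for j, space in enumerate(row):
--                 if space == '#' and i != len(board)-1:
--                     if board[i+1][j] == '#' or board[i+1][j] == '-':
--                         board[i][j] = '-'
--                         board[i+1][j] = '#'
--                     elif board[i+1][j] == '*':
--                         board[i][j] = '-'
--                         for a in range(3):
--                             for b in range(3):
--                                 explodedSpcs.append([i+a, j+b-1])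
--         # if the new position that the box took was previously occupied by an obstical, the box is replaced by the obstical and that specific obstical is saved for exploding effect. so they can simultanously explode
--         #all obsticals that got hit by a box scan for any bordering boxes (either the same position as an adjacent list or 1 to the left or right of current list). Those boxes are replaced by empty space (destroyed)
--         for i, row in enumerate(board):
--             for j, space in enumerate(row):
--                 pos = [i, j]
--                 if space == '#' and pos in explodedSpcs:
--                     board[i][j] = '-'
--
--     return board
-- ===== SOURCE B (Python) =====
-- def solution(board):
--     # Equivalence is about the RETURN value: A mutates its argument in place; B builds new rows.
--     while True:
--         # one bottom-up sweep: per-column "a '-' lies strictly below" flags,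
--         # instead of rescanning all rows below every box
--         dash_below = {}
--         unsettled = False
--         for row in reversed(board):
--             for j, cell in enumerate(row):
--                 if cell == '#' and dash_below.get(j, False):
--                     unsettled = True
--                 if cell == '-':
--                     dash_below[j] = True
--         if not unsettled:
--             return board
--         # one top-down pass, carrying each row's updated state downwards
--         newb = []
--         ex = set()
--         cur = list(board[0])
--         for i in range(len(board) - 1):
--             nxt = list(board[i + 1])
--             out = []
--             new_nxt = []
--             for j, (c, d) in enumerate(zip(cur, nxt)):
--                 if c == '#' and (d == '#' or d == '-'):
--                     out.append('-')
--                     new_nxt.append('#')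
--                 elif c == '#' and d == '*':
--                     out.append('-')
--                     new_nxt.append(d)
--                     for a in range(3):
--                         for b in range(3):
--                             ex.add((i + a, j + b - 1))
--                 else:
--                     out.append(c)
--                     new_nxt.append(d)
--             newb.append(out)
--             cur = new_nxt + nxt[len(new_nxt):]
--         newb.append(cur)
--         # every box inside an exploded 3x3 area disappears
--         board = [['-' if c == '#' and (i, j) in ex else c
--                   for j, c in enumerate(row)] for i, row in enumerate(newb)]
-- ===== Notes on version B (the rewrite author's own statement) =====
-- stated objective: alternative
-- what changed: A rescans every row below every box on every settledness check and mutates the board cell-by-cell through indices (list membership for explosions); B decides settledness in one bottom-up sweep of per-column 'dash below' flags, performs the fall as a single top-down pass carrying each row's updated state, and clears explosions via a set and one comprehension.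
import Mathlib
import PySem

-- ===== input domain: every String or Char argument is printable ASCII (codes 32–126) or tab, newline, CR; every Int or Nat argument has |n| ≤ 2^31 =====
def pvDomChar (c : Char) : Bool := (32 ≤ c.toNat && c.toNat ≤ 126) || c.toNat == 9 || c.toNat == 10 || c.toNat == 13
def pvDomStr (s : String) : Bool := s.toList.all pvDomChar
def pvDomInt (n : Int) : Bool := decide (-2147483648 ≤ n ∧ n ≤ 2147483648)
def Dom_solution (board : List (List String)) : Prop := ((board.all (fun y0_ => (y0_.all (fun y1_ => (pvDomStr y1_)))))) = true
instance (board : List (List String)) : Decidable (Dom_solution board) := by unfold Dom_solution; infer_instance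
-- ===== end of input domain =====

-- B replaces A's per-box downward rescans by one bottom-up sweep of per-column flags and a single
-- carrying top-down fall pass; equivalence is about the RETURN value (A mutates its argument in place, B does not).

-- ===== PORT A =====
-- index read board[i][j]; total form of the access, exact on every input Pre_ admits (Python raises nowhere there)
def pvGet2 (b : List (List String)) (i j : Nat) : String := (b.getD i []).getD j ""
-- index write board[i][j] = v (same caveat)
def pvSet2 (b : List (List String)) (i j : Nat) (v : String) : List (List String) :=
  b.set i ((b.getD i []).set j v)

-- the `boxesNotSettled` triple loop of A
def checkA (b : List (List String)) : Bool :=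
  (List.range b.length).foldl (fun acc i =>
    (List.range ((b.getD i []).length)).foldl (fun acc j =>
      if pvGet2 b i j = "#" then
        (b.drop i).foldl (fun acc r => if r.getD j "" = "-" then true else acc) acc
      else acc) acc) false

-- the 3x3 block appended to explodedSpcs, in A's (a, b) loop order
def pvExpl (i j : Nat) : List (Int × Int) :=
  (List.range 3).flatMap (fun a => (List.range 3).map (fun bb => ((i : Int) + a, (j : Int) + bb - 1)))

-- A's body for one cell (i, j) of the falling pass
def passAstep (R : Nat) (st : List (List String) × List (Int × Int)) (i j : Nat) :
    List (List String) × List (Int × Int) :=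
  if pvGet2 st.1 i j = "#" ∧ i ≠ R - 1 then
    if pvGet2 st.1 (i + 1) j = "#" ∨ pvGet2 st.1 (i + 1) j = "-" then
      (pvSet2 (pvSet2 st.1 i j "-") (i + 1) j "#", st.2)
    else if pvGet2 st.1 (i + 1) j = "*" then
      (pvSet2 st.1 i j "-", st.2 ++ pvExpl i j)
    else st
  else st

-- A's falling pass (second double loop), in-place on the board, collecting explodedSpcs
def passA (b : List (List String)) : List (List String) × List (Int × Int) :=
  (List.range b.length).foldl (fun st i =>
    (List.range ((st.1.getD i []).length)).foldl (fun st j => passAstep b.length st i j) st)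
    (b, [])

-- A's third double loop: destroy boxes sitting on exploded positions
def clearA (b0 : List (List String)) (ex : List (Int × Int)) : List (List String) :=
  (List.range b0.length).foldl (fun b i =>
    (List.range ((b.getD i []).length)).foldl (fun b j =>
      if pvGet2 b i j = "#" ∧ ((i : Int), (j : Int)) ∈ ex then pvSet2 b i j "-" else b) b) b0

-- A's while loop; the fuel is a totality guard only: on every input Pre_ admits the loop
-- provably needs at most (#boxes + 1) ≤ R*C + 1 iterations
def loopA : Nat → List (List String) → List (List String)
  | 0, b => b
  | fuel + 1, b =>
    if checkA b then
      let p := passA b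
      loopA fuel (clearA p.1 p.2)
    else b

def solution (board : List (List String)) : List (List String) :=
  loopA (board.length * (board.headD []).length + 2) board

-- ===== PORT B =====
-- one row of B's bottom-up settledness sweep (dash_below dict, unsettled flag)
def sweepRowB (st : PySem.Dict Int Bool × Bool) (row : List String) : PySem.Dict Int Bool × Bool :=
  (PySem.List.enumerate row 0).foldl (fun st p =>
    let st1 := if p.2 = "#" ∧ st.1.getD p.1 false = true then (st.1, true) else st
    if p.2 = "-" then (st1.1.insert p.1 true, st1.2) else st1) st

def unsettledB (b : List (List String)) : Bool :=
  (b.reverse.foldl sweepRowB (PySem.Dict.empty, false)).2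

-- ex.add((i+a, j+b-1)) for a in range(3) for b in range(3)
def explAddB (ex : PySem.Set (Int × Int)) (i j : Int) : PySem.Set (Int × Int) :=
  (List.range 3).foldl (fun e a =>
    (List.range 3).foldl (fun e bb => PySem.Set.add e (i + (a : Int), j + (bb : Int) - 1)) e) ex

-- one step of B's carrying fall pass: current row `cur` falls into row `nxt`
def fallRowB (i : Nat) (cur nxt : List String) (ex : PySem.Set (Int × Int)) :
    List String × List String × PySem.Set (Int × Int) :=
  let r := (PySem.List.enumerate (cur.zip nxt) 0).foldl
    (fun (st : List String × List String × PySem.Set (Int × Int)) p =>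
      if p.2.1 = "#" ∧ (p.2.2 = "#" ∨ p.2.2 = "-") then (st.1 ++ ["-"], st.2.1 ++ ["#"], st.2.2)
      else if p.2.1 = "#" ∧ p.2.2 = "*" then
        (st.1 ++ ["-"], st.2.1 ++ [p.2.2], explAddB st.2.2 (i : Int) p.1)
      else (st.1 ++ [p.2.1], st.2.1 ++ [p.2.2], st.2.2))
    ([], [], ex)
  (r.1, r.2.1 ++ nxt.drop r.2.1.length, r.2.2)

-- B's whole fall pass: state (newb, ex, cur)
def fallB (b : List (List String)) : List (List String) × PySem.Set (Int × Int) :=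
  let r := (List.range (b.length - 1)).foldl
    (fun (st : List (List String) × PySem.Set (Int × Int) × List String) i =>
      let t := fallRowB i st.2.2 (b.getD (i + 1) []) st.2.1
      (st.1 ++ [t.1], t.2.2, t.2.1))
    ([], PySem.Set.empty, b.getD 0 [])
  (r.1 ++ [r.2.2], r.2.1)

-- B's clearing comprehension
def clearB (nb : List (List String)) (ex : PySem.Set (Int × Int)) : List (List String) :=
  (PySem.List.enumerate nb 0).map (fun pr =>
    (PySem.List.enumerate pr.2 0).map (fun pc =>
      if pc.2 = "#" ∧ PySem.Set.contains ex (pr.1, pc.1) = true then "-" else pc.2))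

-- B's while True loop; same totality guard as A's port
def loopB : Nat → List (List String) → List (List String)
  | 0, b => b
  | fuel + 1, b =>
    if unsettledB b then
      let p := fallB b
      loopB fuel (clearB p.1 p.2)
    else b

def solution_alt (board : List (List String)) : List (List String) :=
  loopB (board.length * (board.headD []).length + 2) board

-- ===== PRECONDITION & SPEC =====
-- Pre_ excludes boards that are not already settled and are ragged or hold cells other than
-- '#', '-', '*': on those A can raise IndexError or loop forever; a few of them (where every index
-- A touches happens to exist) do terminate and are conservatively excluded.
def Pre_solution (board : List (List String)) : Prop :=
  ((∀ r ∈ board, r.length = (board.headD []).length) ∧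
    (∀ r ∈ board, ∀ c ∈ r, c = "#" ∨ c = "-" ∨ c = "*"))
  ∨ (∀ i < board.length, ∀ j < (board.getD i []).length,
      (board.getD i []).getD j "" = "#" →
        ∀ r ∈ board.drop i, j < r.length ∧ r.getD j "" ≠ "-")

instance (board : List (List String)) : Decidable (Pre_solution board) := by
  unfold Pre_solution; infer_instance

def pvWitness_solution : List (List String) := [["#", "-"], ["-", "*"]]

def Spec_solution (board : List (List String)) (out : List (List String)) : Prop := out = solution_alt board
instance (board : List (List String)) (out : List (List String)) : Decidable (Spec_solution board out) := by unfold Spec_solution; infer_instance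

-- ===== CLAIM (what is proved, stated in full; the proofs are below) =====
def Claim_equal_solution : Prop := ∀ (board : List (List String)), Dom_solution board → Pre_solution board → Spec_solution board (solution board)

-- ===== LEMMAS AND PROOFS =====

/- ---------- generic list helpers ---------- -/

theorem pvFoldlOrAny {α : Type} (f : α → Bool) :
    ∀ (l : List α) (a : Bool), l.foldl (fun acc x => acc || f x) a = (a || l.any f) := by
  intro l
  induction l with
  | nil => simp
  | cons x xs ih => intro a; simp [ih, Bool.or_assoc]

theorem pvGetD_append_cons {α : Type} (P : List α) (x : α) (rest : List α) (d : α) :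
    (P ++ x :: rest).getD P.length d = x := by
  simp [List.getD]

theorem pvSet_append_cons {α : Type} (P : List α) (x : α) (rest : List α) (v : α) :
    (P ++ x :: rest).set P.length v = P ++ v :: rest := by
  simp

theorem pvGetD_eq_headD_drop {α : Type} (l : List α) (n : Nat) (d : α) :
    l.getD n d = (l.drop n).headD d := by
  induction l generalizing n with
  | nil => simp [List.getD]
  | cons x xs ih => cases n <;> simp_all [List.getD]

/- ---------- the common unsettledness proposition ---------- -/

def UP (b : List (List String)) : Prop :=
  ∃ i, i < b.length ∧ ∃ j : Nat, pvGet2 b i j = "#" ∧ ∃ r ∈ b.drop i, r.getD j "" = "-"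

theorem pvGet2_hash_lt {b : List (List String)} {i j : Nat} (h : pvGet2 b i j = "#") :
    j < (b.getD i []).length := by
  by_contra hj
  rw [pvGet2, List.getD_eq_getElem?_getD, List.getElem?_eq_none (le_of_not_gt hj)] at h
  simp at h

theorem pvFoldlIfOr {α : Type} (p : α → Prop) [DecidablePred p] (q : α → Bool) :
    ∀ (l : List α) (a : Bool),
      l.foldl (fun acc x => if p x then (acc || q x) else acc) a
        = (a || l.any (fun x => decide (p x) && q x)) := by
  intro l a
  have h : (fun (acc : Bool) (x : α) => if p x then (acc || q x) else acc)
      = fun acc x => acc || (decide (p x) && q x) := by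
    funext acc x; by_cases h : p x <;> simp [h]
  rw [h, pvFoldlOrAny]

theorem checkA_iff (b : List (List String)) : checkA b = true ↔ UP b := by
  have h1 : ∀ (j : Nat) (a : Bool) (l : List (List String)),
      l.foldl (fun acc r => if r.getD j "" = "-" then true else acc) a
        = (a || l.any (fun r => decide (r.getD j "" = "-"))) := by
    intro j a l
    have h : (fun (acc : Bool) (r : List String) => if r.getD j "" = "-" then true else acc)
        = fun acc r => acc || decide (r.getD j "" = "-") := by
      funext acc r
      by_cases h : r.getD j "" = "-"
      · rw [if_pos h]; symm; simp only [Bool.or_eq_true, decide_eq_true_eq]; exact Or.inr h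
      · rw [if_neg h, decide_eq_false h, Bool.or_false]
    rw [h, pvFoldlOrAny]
  have h2 : ∀ (i : Nat) (a : Bool),
      (List.range ((b.getD i []).length)).foldl
          (fun acc j => if pvGet2 b i j = "#" then
            (b.drop i).foldl (fun acc r => if r.getD j "" = "-" then true else acc) acc
          else acc) a
        = (a || (List.range ((b.getD i []).length)).any (fun j =>
            decide (pvGet2 b i j = "#") && (b.drop i).any (fun r => decide (r.getD j "" = "-")))) := by
    intro i a
    have h : (fun (acc : Bool) (j : Nat) => if pvGet2 b i j = "#" then
            (b.drop i).foldl (fun acc r => if r.getD j "" = "-" then true else acc) acc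
          else acc)
        = fun acc j => if pvGet2 b i j = "#" then
            (acc || (b.drop i).any (fun r => decide (r.getD j "" = "-"))) else acc := by
      funext acc j
      by_cases h : pvGet2 b i j = "#"
      · rw [if_pos h, if_pos h, h1]
      · rw [if_neg h, if_neg h]

    rw [h, pvFoldlIfOr]
  have h3 : checkA b
      = (List.range b.length).any (fun i => (List.range ((b.getD i []).length)).any (fun j =>
          decide (pvGet2 b i j = "#") && (b.drop i).any (fun r => decide (r.getD j "" = "-")))) := by
    unfold checkA
    have h : (fun (acc : Bool) (i : Nat) =>
          (List.range ((b.getD i []).length)).foldl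
            (fun acc j => if pvGet2 b i j = "#" then
              (b.drop i).foldl (fun acc r => if r.getD j "" = "-" then true else acc) acc
            else acc) acc)
        = fun acc i => acc || (List.range ((b.getD i []).length)).any (fun j =>
            decide (pvGet2 b i j = "#") && (b.drop i).any (fun r => decide (r.getD j "" = "-"))) := by
      funext acc i; rw [h2]
    rw [h, pvFoldlOrAny]; simp
  rw [h3]
  simp only [List.any_eq_true, List.mem_range, Bool.and_eq_true, decide_eq_true_eq]
  constructor
  · rintro ⟨i, hi, j, hj, hget, r, hr, hrd⟩
    exact ⟨i, hi, j, hget, r, hr, hrd⟩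
  · rintro ⟨i, hi, j, hget, r, hr, hrd⟩
    exact ⟨i, hi, j, pvGet2_hash_lt hget, hget, r, hr, hrd⟩

theorem pvGetD_ne_empty_lt {r : List String} {j : Nat} (h : r.getD j "" ≠ "") :
    j < r.length := by
  by_contra hj
  rw [List.getD_eq_getElem?_getD, List.getElem?_eq_none (le_of_not_gt hj)] at h
  simp at h

/-- effect of one enumerate-fold of B's sweep on an arbitrary state -/
theorem sweepGo (cs : List String) : ∀ (s : Nat) (st : PySem.Dict Int Bool × Bool),
    (∀ j : Int,
      (((PySem.List.enumerate cs (s : Int)).foldl (fun st p =>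
        let st1 := if p.2 = "#" ∧ st.1.getD p.1 false = true then (st.1, true) else st
        if p.2 = "-" then (st1.1.insert p.1 true, st1.2) else st1) st).1.getD j false = true
        ↔ (st.1.getD j false = true ∨ ∃ t : Nat, t < cs.length ∧ j = ((s + t : Nat) : Int) ∧ cs.getD t "" = "-")))
    ∧ (((PySem.List.enumerate cs (s : Int)).foldl (fun st p =>
        let st1 := if p.2 = "#" ∧ st.1.getD p.1 false = true then (st.1, true) else st
        if p.2 = "-" then (st1.1.insert p.1 true, st1.2) else st1) st).2 = true
        ↔ (st.2 = true ∨ ∃ t : Nat, t < cs.length ∧ cs.getD t "" = "#" ∧ st.1.getD ((s + t : Nat) : Int) false = true)) := by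
  induction cs with
  | nil => intro s st; simp [PySem.List.enumerate_nil]
  | cons c cs ih =>
    intro s st
    rw [PySem.List.enumerate_cons]
    have hcast : (s : Int) + 1 = ((s + 1 : Nat) : Int) := by push_cast; ring
    simp only [List.foldl_cons, hcast]
    set st' := (fun (st : PySem.Dict Int Bool × Bool) (p : Int × String) =>
        let st1 := if p.2 = "#" ∧ st.1.getD p.1 false = true then (st.1, true) else st
        if p.2 = "-" then (st1.1.insert p.1 true, st1.2) else st1) st ((s : Int), c) with hst'
    have hd : st'.1 = if c = "-" then st.1.insert (s : Int) true else st.1 := by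
      rw [hst']; by_cases h1 : c = "#" ∧ st.1.getD (s : Int) false = true <;>
        by_cases h2 : c = "-" <;> simp [h1, h2]
    have hb : st'.2 = (if c = "#" ∧ st.1.getD (s : Int) false = true then true else st.2) := by
      rw [hst']; by_cases h1 : c = "#" ∧ st.1.getD (s : Int) false = true <;>
        by_cases h2 : c = "-" <;> simp [h1, h2]
    obtain ⟨iha, ihb⟩ := ih (s + 1) st'
    constructor
    · intro j
      rw [iha j, hd]
      constructor
      · rintro (hj | ⟨t, ht, hjt, hdash⟩)
        · by_cases h2 : c = "-"
          · rw [if_pos h2, PySem.Dict.getD_insert] at hj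
            by_cases hjs : j = (s : Int)
            · exact Or.inr ⟨0, by simp only [List.length_cons]; omega, by push_cast [hjs]; ring, by simp [h2]⟩
            · rw [if_neg hjs] at hj; exact Or.inl hj
          · rw [if_neg h2] at hj; exact Or.inl hj
        · exact Or.inr ⟨t + 1, by simp only [List.length_cons]; omega, by push_cast [hjt]; ring, by simpa using hdash⟩
      · rintro (hj | ⟨t, ht, hjt, hdash⟩)
        · left
          by_cases h2 : c = "-"
          · rw [if_pos h2, PySem.Dict.getD_insert]
            by_cases hjs : j = (s : Int)
            · simp [hjs]
            · rw [if_neg hjs]; exact hj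
          · rw [if_neg h2]; exact hj
        · match t, hdash with
          | 0, hdash =>
            left
            have h2 : c = "-" := by simpa using hdash
            rw [if_pos h2, PySem.Dict.getD_insert, if_pos (by rw [hjt]; push_cast; ring)]
          | t + 1, hdash =>
            right
            exact ⟨t, by simp only [List.length_cons] at ht; omega, by rw [hjt]; push_cast; ring, by simpa using hdash⟩
    · rw [ihb, hb]
      have hro : ∀ t : Nat, st'.1.getD ((s + 1 + t : Nat) : Int) false = st.1.getD ((s + 1 + t : Nat) : Int) false := by
        intro t
        rw [hd]
        by_cases h2 : c = "-"
        · rw [if_pos h2, PySem.Dict.getD_insert, if_neg (by push_cast; omega)]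
        · rw [if_neg h2]
      constructor
      · rintro (hj | ⟨t, ht, hhash, hdict⟩)
        · by_cases h1 : c = "#" ∧ st.1.getD (s : Int) false = true
          · exact Or.inr ⟨0, by simp only [List.length_cons]; omega, by simpa using h1.1, by simpa using h1.2⟩
          · rw [if_neg h1] at hj; exact Or.inl hj
        · rw [hro t] at hdict
          exact Or.inr ⟨t + 1, by simp only [List.length_cons]; omega, by simpa using hhash, by
            have : s + 1 + t = s + (t + 1) := by omega
            rw [← this]; exact hdict⟩
      · rintro (hj | ⟨t, ht, hhash, hdict⟩)
        · left; by_cases h1 : c = "#" ∧ st.1.getD (s : Int) false = true <;> simp [h1, hj]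
        · match t, hhash, hdict with
          | 0, hhash, hdict =>
            left
            rw [if_pos ⟨by simpa using hhash, by simpa using hdict⟩]
          | t + 1, hhash, hdict =>
            right
            refine ⟨t, by simp only [List.length_cons] at ht; omega, by simpa using hhash, ?_⟩
            rw [hro t]
            have : s + 1 + t = s + (t + 1) := by omega
            rw [this]; exact hdict

/-- the intermediate unsettledness proposition used for B's bottom-up sweep -/
def UP' (b : List (List String)) : Prop :=
  ∃ i, i < b.length ∧ ∃ t : Nat, (b.getD i []).getD t "" = "#" ∧
    ∃ r ∈ b.drop (i + 1), r.getD t "" = "-"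

theorem sweepAll_spec (b : List (List String)) :
    (∀ j : Int,
      ((b.reverse.foldl sweepRowB (PySem.Dict.empty, false)).1.getD j false = true
        ↔ ∃ r ∈ b, ∃ t : Nat, j = (t : Int) ∧ r.getD t "" = "-"))
    ∧ ((b.reverse.foldl sweepRowB (PySem.Dict.empty, false)).2 = true ↔ UP' b) := by
  induction b with
  | nil => simp [UP', PySem.Dict.getD_empty]
  | cons row rest ih =>
    have hsplit : (row :: rest).reverse.foldl sweepRowB (PySem.Dict.empty, false)
        = sweepRowB (rest.reverse.foldl sweepRowB (PySem.Dict.empty, false)) row := by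
      rw [List.reverse_cons, List.foldl_append]; rfl
    obtain ⟨iha, ihb⟩ := ih
    set st := rest.reverse.foldl sweepRowB (PySem.Dict.empty, false) with hst
    obtain ⟨ga, gb⟩ := sweepGo row 0 st
    constructor
    · intro j
      rw [hsplit]
      unfold sweepRowB
      rw [show ((0 : Int) = ((0 : Nat) : Int)) by rfl, ga j]
      rw [iha j]
      constructor
      · rintro (⟨r, hr, t, hjt, hdash⟩ | ⟨t, ht, hjt, hdash⟩)
        · exact ⟨r, List.mem_cons_of_mem _ hr, t, hjt, hdash⟩
        · exact ⟨row, List.mem_cons_self, t, by simpa using hjt, hdash⟩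
      · rintro ⟨r, hr, t, hjt, hdash⟩
        rcases List.mem_cons.1 hr with hre | hre
        · exact Or.inr ⟨t, by rw [← hre]; exact pvGetD_ne_empty_lt (by rw [hdash]; decide),
            by simpa using hjt, hre ▸ hdash⟩
        · exact Or.inl ⟨r, hre, t, hjt, hdash⟩
    · rw [hsplit]
      unfold sweepRowB
      rw [show ((0 : Int) = ((0 : Nat) : Int)) by rfl, gb, ihb]
      constructor
      · rintro (h | ⟨t, ht, hhash, hdict⟩)
        · obtain ⟨i, hi, t, hh, r, hr, hd⟩ := h
          exact ⟨i + 1, by simpa using hi, t, by simpa using hh, r, by simpa using hr, hd⟩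
        · rw [show (((0 + t : Nat) : Int)) = ((t : Nat) : Int) by push_cast; ring, iha] at hdict
          obtain ⟨r, hr, t', htt, hd⟩ := hdict
          have : t' = t := by have h0 := htt; push_cast at h0; omega
          exact ⟨0, by simp, t, by simpa using hhash, r, by simpa using hr, by rw [← this]; exact hd⟩
      · rintro ⟨i, hi, t, hhash, r, hr, hd⟩
        match i, hi, hhash, hr with
        | 0, hi, hhash, hr =>
          right
          refine ⟨t, pvGetD_ne_empty_lt (by simp_all), by simpa using hhash, ?_⟩
          rw [show (((0 + t : Nat) : Int)) = ((t : Nat) : Int) by push_cast; ring, iha]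
          exact ⟨r, by simpa using hr, t, rfl, hd⟩
        | i + 1, hi, hhash, hr =>
          left
          exact ⟨i, by simpa using hi, t, by simpa using hhash, r, by simpa using hr, hd⟩

theorem UP'_iff_UP (b : List (List String)) : UP' b ↔ UP b := by
  constructor
  · rintro ⟨i, hi, t, hh, r, hr, hd⟩
    refine ⟨i, hi, t, hh, r, ?_, hd⟩
    rw [List.drop_eq_getElem_cons hi]
    exact List.mem_cons_of_mem _ hr
  · rintro ⟨i, hi, t, hh, r, hr, hd⟩
    rw [List.drop_eq_getElem_cons hi] at hr
    rcases List.mem_cons.1 hr with hre | hre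
    · exfalso
      have : pvGet2 b i t = "-" := by
        rw [pvGet2, show b.getD i [] = b[i] from by
          rw [List.getD_eq_getElem?_getD, List.getElem?_eq_getElem hi]; rfl]
        rw [hre] at hd
        exact hd
      rw [hh] at this; exact absurd this (by decide)
    · exact ⟨i, hi, t, hh, r, hre, hd⟩

theorem unsettledB_iff (b : List (List String)) : unsettledB b = true ↔ UP b := by
  rw [unsettledB, (sweepAll_spec b).2, UP'_iff_UP]

theorem check_eq (b : List (List String)) : checkA b = unsettledB b := by
  cases hA : checkA b <;> cases hB : unsettledB b <;> try rfl
  · exact absurd ((checkA_iff b).2 ((unsettledB_iff b).1 hB)) (by simp [hA])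
  · exact absurd ((unsettledB_iff b).2 ((checkA_iff b).1 hA)) (by simp [hB])

/- ---------- the falling pass, specification form ---------- -/

def rowSim (i : Nat) : Nat → List String → List String → List String × List String × List (Int × Int)
  | j, c :: cs, d :: ds =>
    let r := rowSim i (j + 1) cs ds
    if c = "#" ∧ (d = "#" ∨ d = "-") then ("-" :: r.1, "#" :: r.2.1, r.2.2)
    else if c = "#" ∧ d = "*" then ("-" :: r.1, d :: r.2.1, pvExpl i j ++ r.2.2)
    else (c :: r.1, d :: r.2.1, r.2.2)
  | _, _, _ => ([], [], [])

def boardSim (i : Nat) (cur : List String) : List (List String) → List (List String) × List (Int × Int)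
  | [] => ([cur], [])
  | nxt :: rest =>
    let r := rowSim i 0 cur nxt
    let t := boardSim (i + 1) r.2.1 rest
    (r.1 :: t.1, r.2.2 ++ t.2)

theorem pvGetD_append_cons2 {α : Type} (P : List α) (x y : α) (rest : List α) (d : α) :
    (P ++ x :: y :: rest).getD (P.length + 1) d = y := by
  rw [show P ++ x :: y :: rest = (P ++ [x]) ++ y :: rest from by simp,
      show P.length + 1 = (P ++ [x]).length from by simp]
  exact pvGetD_append_cons _ _ _ _

theorem pvSet_append_cons2 {α : Type} (P : List α) (x y : α) (rest : List α) (v : α) :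
    (P ++ x :: y :: rest).set (P.length + 1) v = P ++ x :: v :: rest := by
  rw [show P ++ x :: y :: rest = (P ++ [x]) ++ y :: rest from by simp,
      show P.length + 1 = (P ++ [x]).length from by simp, pvSet_append_cons]
  simp

theorem rowSim_len (i : Nat) : ∀ (cur : List String) (j : Nat) (nxt : List String), cur.length = nxt.length →
    (rowSim i j cur nxt).1.length = cur.length ∧ (rowSim i j cur nxt).2.1.length = nxt.length := by
  intro cur
  induction cur with
  | nil =>
    intro j nxt h
    have : nxt = [] := List.length_eq_zero_iff.mp h.symm
    subst this; simp [rowSim]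
  | cons c cs ih =>
    intro j nxt h
    cases nxt with
    | nil => simp at h
    | cons d ds =>
      simp only [List.length_cons] at h
      have h' : cs.length = ds.length := by omega
      obtain ⟨ih1, ih2⟩ := ih (j + 1) ds h'
      simp only [rowSim]
      split_ifs <;> simp [ih1, ih2]

theorem boardSim_shape (rest : List (List String)) :
    ∀ (i : Nat) (cur : List String), (∀ r ∈ rest, r.length = cur.length) →
      (boardSim i cur rest).1.length = rest.length + 1 ∧
      ∀ r ∈ (boardSim i cur rest).1, r.length = cur.length := by
  induction rest with
  | nil =>
    intro i cur _
    simp [boardSim]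
  | cons nxt rs ih =>
    intro i cur hrect
    have hn : nxt.length = cur.length := hrect nxt (List.mem_cons_self)
    obtain ⟨l1, l2⟩ := rowSim_len i cur 0 nxt hn.symm
    obtain ⟨ihl, ihr⟩ := ih (i + 1) (rowSim i 0 cur nxt).2.1
      (by intro r hr; rw [l2, hn]; exact hrect r (List.mem_cons_of_mem _ hr))
    constructor
    · simp [boardSim, ihl]
    · intro r hr
      simp only [boardSim, List.mem_cons] at hr
      rcases hr with hr | hr
      · rw [hr, l1]
      · rw [ihr r hr, l2, hn]

/- A's inner loop at a non-last row k = P.length equals rowSim -/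
theorem innerA (R : Nat) (P rest : List (List String)) (hkR : P.length + 1 < R) :
    ∀ (cur nxt d1 d2 : List String) (ex : List (Int × Int)),
      cur.length = nxt.length → d1.length = d2.length →
      List.foldl (fun st j => passAstep R st P.length j)
          (P ++ (d1 ++ cur) :: (d2 ++ nxt) :: rest, ex) (List.range' d1.length cur.length) =
        (P ++ (d1 ++ (rowSim P.length d1.length cur nxt).1) ::
              (d2 ++ (rowSim P.length d1.length cur nxt).2.1) :: rest,
         ex ++ (rowSim P.length d1.length cur nxt).2.2) := by
  intro cur
  induction cur with
  | nil =>
    intro nxt d1 d2 ex hlen hd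
    have : nxt = [] := List.length_eq_zero_iff.mp hlen.symm
    subst this
    simp [rowSim]
  | cons c cs ih =>
    intro nxt d1 d2 ex hlen hd
    cases nxt with
    | nil => simp at hlen
    | cons d ds =>
      simp only [List.length_cons] at hlen
      have hlen' : cs.length = ds.length := by omega
      rw [show List.range' d1.length (c :: cs).length
            = d1.length :: List.range' (d1.length + 1) cs.length from by
          rw [List.length_cons, List.range'_succ], List.foldl_cons]
      have hg1 : pvGet2 (P ++ (d1 ++ c :: cs) :: (d2 ++ d :: ds) :: rest) P.length d1.length = c := by
        rw [pvGet2, pvGetD_append_cons, pvGetD_append_cons]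
      have hg2 : pvGet2 (P ++ (d1 ++ c :: cs) :: (d2 ++ d :: ds) :: rest) (P.length + 1) d1.length = d := by
        rw [pvGet2, pvGetD_append_cons2, hd, pvGetD_append_cons]
      have hne : P.length ≠ R - 1 := by omega
      by_cases hc : c = "#"
      · by_cases hmv : d = "#" ∨ d = "-"
        · -- the box moves down (or merges into the box below)
          have hstep : passAstep R (P ++ (d1 ++ c :: cs) :: (d2 ++ d :: ds) :: rest, ex) P.length d1.length
              = (P ++ (d1 ++ "-" :: cs) :: (d2 ++ "#" :: ds) :: rest, ex) := by
            have hs1 : pvSet2 (P ++ (d1 ++ c :: cs) :: (d2 ++ d :: ds) :: rest) P.length d1.length "-"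
                = P ++ (d1 ++ "-" :: cs) :: (d2 ++ d :: ds) :: rest := by
              rw [pvSet2, pvGetD_append_cons, pvSet_append_cons, pvSet_append_cons]
            have hs2 : pvSet2 (P ++ (d1 ++ "-" :: cs) :: (d2 ++ d :: ds) :: rest) (P.length + 1) d1.length "#"
                = P ++ (d1 ++ "-" :: cs) :: (d2 ++ "#" :: ds) :: rest := by
              rw [pvSet2, pvGetD_append_cons2, hd, pvSet_append_cons, pvSet_append_cons2]
            unfold passAstep
            simp only [hg1, hg2]
            rw [if_pos ⟨hc, hne⟩, if_pos hmv, hs1, hs2]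
          rw [hstep,
            show P ++ (d1 ++ "-" :: cs) :: (d2 ++ "#" :: ds) :: rest
              = P ++ ((d1 ++ ["-"]) ++ cs) :: ((d2 ++ ["#"]) ++ ds) :: rest from by simp,
            show d1.length + 1 = (d1 ++ ["-"]).length from by simp]
          rw [ih ds (d1 ++ ["-"]) (d2 ++ ["#"]) ex hlen' (by simp [hd])]
          simp only [rowSim, if_pos (⟨hc, hmv⟩ : c = "#" ∧ (d = "#" ∨ d = "-"))]
          simp
        · by_cases hex : d = "*"
          · -- the box hits an obstacle and explodes
            have hstep : passAstep R (P ++ (d1 ++ c :: cs) :: (d2 ++ d :: ds) :: rest, ex) P.length d1.length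
                = (P ++ (d1 ++ "-" :: cs) :: (d2 ++ d :: ds) :: rest, ex ++ pvExpl P.length d1.length) := by
              have hs1 : pvSet2 (P ++ (d1 ++ c :: cs) :: (d2 ++ d :: ds) :: rest) P.length d1.length "-"
                  = P ++ (d1 ++ "-" :: cs) :: (d2 ++ d :: ds) :: rest := by
                rw [pvSet2, pvGetD_append_cons, pvSet_append_cons, pvSet_append_cons]
              unfold passAstep
              simp only [hg1, hg2]
              rw [if_pos ⟨hc, hne⟩, if_neg hmv, if_pos hex, hs1]
            rw [hstep,
              show P ++ (d1 ++ "-" :: cs) :: (d2 ++ d :: ds) :: rest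
                = P ++ ((d1 ++ ["-"]) ++ cs) :: ((d2 ++ [d]) ++ ds) :: rest from by simp,
              show d1.length + 1 = (d1 ++ ["-"]).length from by simp]
            rw [ih ds (d1 ++ ["-"]) (d2 ++ [d]) (ex ++ pvExpl P.length d1.length) hlen' (by simp [hd])]
            simp only [rowSim, if_neg (by tauto : ¬(c = "#" ∧ (d = "#" ∨ d = "-"))),
              if_pos (⟨hc, hex⟩ : c = "#" ∧ d = "*")]
            simp
          · -- the cell below is unknown: nothing happens
            have hstep : passAstep R (P ++ (d1 ++ c :: cs) :: (d2 ++ d :: ds) :: rest, ex) P.length d1.length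
                = (P ++ (d1 ++ c :: cs) :: (d2 ++ d :: ds) :: rest, ex) := by
              unfold passAstep
              simp only [hg1, hg2]
              rw [if_pos ⟨hc, hne⟩, if_neg hmv, if_neg hex]
            rw [hstep,
              show P ++ (d1 ++ c :: cs) :: (d2 ++ d :: ds) :: rest
                = P ++ ((d1 ++ [c]) ++ cs) :: ((d2 ++ [d]) ++ ds) :: rest from by simp,
              show d1.length + 1 = (d1 ++ [c]).length from by simp]
            rw [ih ds (d1 ++ [c]) (d2 ++ [d]) ex hlen' (by simp [hd])]
            simp only [rowSim, if_neg (by tauto : ¬(c = "#" ∧ (d = "#" ∨ d = "-"))),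
              if_neg (by tauto : ¬(c = "#" ∧ d = "*"))]
            simp
      · -- not a box: nothing happens
        have hstep : passAstep R (P ++ (d1 ++ c :: cs) :: (d2 ++ d :: ds) :: rest, ex) P.length d1.length
            = (P ++ (d1 ++ c :: cs) :: (d2 ++ d :: ds) :: rest, ex) := by
          unfold passAstep
          simp only [hg1]
          rw [if_neg (by tauto)]
        rw [hstep,
          show P ++ (d1 ++ c :: cs) :: (d2 ++ d :: ds) :: rest
            = P ++ ((d1 ++ [c]) ++ cs) :: ((d2 ++ [d]) ++ ds) :: rest from by simp,
          show d1.length + 1 = (d1 ++ [c]).length from by simp]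
        rw [ih ds (d1 ++ [c]) (d2 ++ [d]) ex hlen' (by simp [hd])]
        simp only [rowSim, if_neg (by tauto : ¬(c = "#" ∧ (d = "#" ∨ d = "-"))),
          if_neg (by tauto : ¬(c = "#" ∧ d = "*"))]
        simp

/- A's inner loop at the last row is the identity -/
theorem innerA_last (R : Nat) (k : Nat) (hk : k = R - 1) (l : List Nat)
    (st : List (List String) × List (Int × Int)) :
    List.foldl (fun st j => passAstep R st k j) st l = st := by
  induction l generalizing st with
  | nil => rfl
  | cons x xs ih =>
    have h1 : passAstep R st k x = st := by simp [passAstep, hk]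
    simp only [List.foldl_cons, h1]; exact ih _

theorem outerA (R : Nat) (rest : List (List String)) :
    ∀ (P : List (List String)) (cur : List String) (ex : List (Int × Int)),
      R = P.length + 1 + rest.length → (∀ r ∈ rest, r.length = cur.length) →
      List.foldl (fun st i =>
          (List.range ((st.1.getD i []).length)).foldl (fun st j => passAstep R st i j) st)
        (P ++ cur :: rest, ex) (List.range' P.length (rest.length + 1)) =
      (P ++ (boardSim P.length cur rest).1, ex ++ (boardSim P.length cur rest).2) := by
  induction rest with
  | nil =>
    intro P cur ex hR _
    rw [List.range'_succ]
    simp only [List.foldl_cons]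
    rw [show ((P ++ cur :: [] : List (List String)), ex).1.getD P.length [] = cur from
        pvGetD_append_cons _ _ _ _]
    rw [innerA_last R P.length (by simp only [List.length_nil] at hR; omega) _ _]
    simp [boardSim]
  | cons nxt rs ih =>
    intro P cur ex hR hrect
    have hcn : nxt.length = cur.length := hrect nxt List.mem_cons_self
    simp only [List.length_cons]
    rw [show List.range' P.length (rs.length + 1 + 1) = P.length :: List.range' (P.length + 1) (rs.length + 1) from List.range'_succ, List.foldl_cons]
    rw [show ((P ++ cur :: nxt :: rs : List (List String)), ex).1.getD P.length [] = cur from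
        pvGetD_append_cons _ _ _ _]
    rw [List.range_eq_range']
    have h1 := innerA R P rs (by simp only [List.length_cons] at hR; omega) cur nxt [] [] ex hcn.symm rfl
    simp only [List.nil_append, List.length_nil] at h1
    rw [h1]
    have hlen2 : (rowSim P.length 0 cur nxt).2.1.length = nxt.length :=
      (rowSim_len P.length cur 0 nxt hcn.symm).2
    have ih' := ih (P ++ [(rowSim P.length 0 cur nxt).1]) (rowSim P.length 0 cur nxt).2.1
      (ex ++ (rowSim P.length 0 cur nxt).2.2)
      (by simp only [List.length_append, List.length_cons, List.length_nil] at hR ⊢; omega)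
      (by intro r hr; rw [hlen2, hcn]; exact hrect r (List.mem_cons_of_mem _ hr))
    simp only [List.length_append, List.length_cons, List.length_nil] at ih'
    rw [show P ++ (rowSim P.length 0 cur nxt).1 :: (rowSim P.length 0 cur nxt).2.1 :: rs
        = (P ++ [(rowSim P.length 0 cur nxt).1]) ++ (rowSim P.length 0 cur nxt).2.1 :: rs from by simp,
      ih']
    simp only [boardSim]
    simp

theorem passA_eq (r0 : List String) (rest : List (List String))
    (hrect : ∀ r ∈ rest, r.length = r0.length) :
    passA (r0 :: rest) = ((boardSim 0 r0 rest).1, (boardSim 0 r0 rest).2) := by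
  unfold passA
  rw [show (r0 :: rest).length = rest.length + 1 from by simp, List.range_eq_range']
  have h := outerA (rest.length + 1) rest [] r0 [] (by simp; omega) hrect
  simpa using h

/- B's inner loop equals rowSim -/
theorem explAddB_eq (ex : PySem.Set (Int × Int)) (i j : Nat) :
    explAddB ex (i : Int) (j : Int) = (pvExpl i j).foldl (fun s x => PySem.Set.add s x) ex := by
  simp [explAddB, pvExpl, List.range_succ]

theorem innerB (i : Nat) :
    ∀ (cs ds : List String) (j : Nat) (o n : List String) (ex : PySem.Set (Int × Int)),
      (PySem.List.enumerate (cs.zip ds) (j : Int)).foldl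
        (fun (st : List String × List String × PySem.Set (Int × Int)) p =>
          if p.2.1 = "#" ∧ (p.2.2 = "#" ∨ p.2.2 = "-") then (st.1 ++ ["-"], st.2.1 ++ ["#"], st.2.2)
          else if p.2.1 = "#" ∧ p.2.2 = "*" then
            (st.1 ++ ["-"], st.2.1 ++ [p.2.2], explAddB st.2.2 (i : Int) p.1)
          else (st.1 ++ [p.2.1], st.2.1 ++ [p.2.2], st.2.2)) (o, n, ex) =
      (o ++ (rowSim i j cs ds).1, n ++ (rowSim i j cs ds).2.1,
       (rowSim i j cs ds).2.2.foldl (fun s x => PySem.Set.add s x) ex) := by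
  intro cs
  induction cs with
  | nil =>
    intro ds j o n ex
    simp [rowSim, PySem.List.enumerate_nil]
  | cons c cs ih =>
    intro ds j o n ex
    cases ds with
    | nil => simp [rowSim, PySem.List.enumerate_nil]
    | cons d ds =>
      rw [List.zip_cons_cons, PySem.List.enumerate_cons, List.foldl_cons,
        show (j : Int) + 1 = ((j + 1 : Nat) : Int) from by push_cast; ring]
      by_cases hmv : c = "#" ∧ (d = "#" ∨ d = "-")
      · rw [show (if c = "#" ∧ (d = "#" ∨ d = "-") then (o ++ ["-"], n ++ ["#"], ex)
            else if c = "#" ∧ d = "*" then (o ++ ["-"], n ++ [d], explAddB ex (i : Int) (j : Int))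
            else (o ++ [c], n ++ [d], ex)) = (o ++ ["-"], n ++ ["#"], ex) from if_pos hmv]
        rw [ih ds (j + 1) (o ++ ["-"]) (n ++ ["#"]) ex]
        simp only [rowSim, if_pos hmv]
        simp
      · by_cases hex : c = "#" ∧ d = "*"
        · rw [show (if c = "#" ∧ (d = "#" ∨ d = "-") then (o ++ ["-"], n ++ ["#"], ex)
              else if c = "#" ∧ d = "*" then (o ++ ["-"], n ++ [d], explAddB ex (i : Int) (j : Int))
              else (o ++ [c], n ++ [d], ex)) = (o ++ ["-"], n ++ [d], explAddB ex (i : Int) (j : Int)) from by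
            rw [if_neg hmv, if_pos hex]]
          rw [ih ds (j + 1) (o ++ ["-"]) (n ++ [d]) (explAddB ex (i : Int) (j : Int))]
          simp only [rowSim, if_neg hmv, if_pos hex]
          rw [explAddB_eq, ← List.foldl_append]
          simp
        · rw [show (if c = "#" ∧ (d = "#" ∨ d = "-") then (o ++ ["-"], n ++ ["#"], ex)
              else if c = "#" ∧ d = "*" then (o ++ ["-"], n ++ [d], explAddB ex (i : Int) (j : Int))
              else (o ++ [c], n ++ [d], ex)) = (o ++ [c], n ++ [d], ex) from by
            rw [if_neg hmv, if_neg hex]]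
          rw [ih ds (j + 1) (o ++ [c]) (n ++ [d]) ex]
          simp only [rowSim, if_neg hmv, if_neg hex]
          simp

theorem fallRowB_eq (i : Nat) (cur nxt : List String) (ex : PySem.Set (Int × Int))
    (h : cur.length = nxt.length) :
    fallRowB i cur nxt ex =
      ((rowSim i 0 cur nxt).1, (rowSim i 0 cur nxt).2.1,
       (rowSim i 0 cur nxt).2.2.foldl (fun s x => PySem.Set.add s x) ex) := by
  unfold fallRowB
  rw [show (0 : Int) = ((0 : Nat) : Int) from rfl, innerB i cur nxt 0 [] [] ex]
  have hl : (rowSim i 0 cur nxt).2.1.length = nxt.length := (rowSim_len i cur 0 nxt h).2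
  simp [hl, List.drop_length]

theorem outerB (b : List (List String)) (rest : List (List String)) :
    ∀ (k : Nat) (N : List (List String)) (exS : PySem.Set (Int × Int)) (cur : List String),
      b.drop (k + 1) = rest → (∀ r ∈ rest, r.length = cur.length) →
      ((((List.range' k rest.length).foldl
          (fun (st : List (List String) × PySem.Set (Int × Int) × List String) i =>
            let t := fallRowB i st.2.2 (b.getD (i + 1) []) st.2.1
            (st.1 ++ [t.1], t.2.2, t.2.1)) (N, exS, cur)).1
        ++ [((List.range' k rest.length).foldl
          (fun (st : List (List String) × PySem.Set (Int × Int) × List String) i =>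
            let t := fallRowB i st.2.2 (b.getD (i + 1) []) st.2.1
            (st.1 ++ [t.1], t.2.2, t.2.1)) (N, exS, cur)).2.2],
        ((List.range' k rest.length).foldl
          (fun (st : List (List String) × PySem.Set (Int × Int) × List String) i =>
            let t := fallRowB i st.2.2 (b.getD (i + 1) []) st.2.1
            (st.1 ++ [t.1], t.2.2, t.2.1)) (N, exS, cur)).2.1)
        : List (List String) × PySem.Set (Int × Int)) =
      (N ++ (boardSim k cur rest).1,
       (boardSim k cur rest).2.foldl (fun s x => PySem.Set.add s x) exS) := by
  induction rest with
  | nil =>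
    intro k N exS cur hdrop _
    simp [boardSim]
  | cons nxt rs ih =>
    intro k N exS cur hdrop hrect
    have hget : b.getD (k + 1) [] = nxt := by
      rw [pvGetD_eq_headD_drop, hdrop]; rfl
    have hcn : cur.length = nxt.length := (hrect nxt List.mem_cons_self).symm
    rw [show List.range' k (nxt :: rs).length = k :: List.range' (k + 1) rs.length from by
      rw [List.length_cons]; exact List.range'_succ]
    simp only [List.foldl_cons, hget, fallRowB_eq k cur nxt exS hcn]
    have hdrop' : b.drop (k + 1 + 1) = rs := by
      have h2 := congrArg (List.drop 1) hdrop
      rw [List.drop_drop] at h2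
      exact h2
    have hlen2 : (rowSim k 0 cur nxt).2.1.length = nxt.length := (rowSim_len k cur 0 nxt hcn).2
    have ih' := ih (k + 1) (N ++ [(rowSim k 0 cur nxt).1]) 
      ((rowSim k 0 cur nxt).2.2.foldl (fun s x => PySem.Set.add s x) exS)
      (rowSim k 0 cur nxt).2.1 hdrop'
      (by intro r hr; rw [hlen2, ← hcn]; exact hrect r (List.mem_cons_of_mem _ hr))
    rw [ih']
    simp only [boardSim]
    rw [List.foldl_append]
    simp

theorem fallB_eq (r0 : List String) (rest : List (List String))
    (hrect : ∀ r ∈ rest, r.length = r0.length) :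
    fallB (r0 :: rest) = ((boardSim 0 r0 rest).1, PySem.Set.ofList (boardSim 0 r0 rest).2) := by
  unfold fallB
  have h := outerB (r0 :: rest) rest 0 [] PySem.Set.empty r0 (by rfl) hrect
  simp only [List.length_cons, Nat.add_sub_cancel, List.range_eq_range',
    show (r0 :: rest).getD 0 [] = r0 from rfl]
  rw [h]
  rw [show PySem.Set.ofList (boardSim 0 r0 rest).2
      = (boardSim 0 r0 rest).2.foldl (fun s x => PySem.Set.add s x) PySem.Set.empty from
    PySem.Set.ofList_eq_foldl _]
  simp

/- ---------- clearing, specification form ---------- -/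

def clearRowS (ex : List (Int × Int)) (i : Nat) : Nat → List String → List String
  | _, [] => []
  | j, c :: cs => (if c = "#" ∧ ((i : Int), (j : Int)) ∈ ex then "-" else c) :: clearRowS ex i (j + 1) cs

def clearS (ex : List (Int × Int)) : Nat → List (List String) → List (List String)
  | _, [] => []
  | i, r :: rs => clearRowS ex i 0 r :: clearS ex (i + 1) rs

theorem clearA_inner (ex : List (Int × Int)) (P rest : List (List String)) :
    ∀ (rem d1 : List String),
      List.foldl (fun b j =>
          if pvGet2 b P.length j = "#" ∧ ((P.length : Int), (j : Int)) ∈ ex then pvSet2 b P.length j "-" else b)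
        (P ++ (d1 ++ rem) :: rest) (List.range' d1.length rem.length) =
      P ++ (d1 ++ clearRowS ex P.length d1.length rem) :: rest := by
  intro rem
  induction rem with
  | nil => intro d1; simp [clearRowS]
  | cons c cs ih =>
    intro d1
    rw [show List.range' d1.length (c :: cs).length
          = d1.length :: List.range' (d1.length + 1) cs.length from by
        rw [List.length_cons]; exact List.range'_succ, List.foldl_cons]
    have hg : pvGet2 (P ++ (d1 ++ c :: cs) :: rest) P.length d1.length = c := by
      rw [pvGet2, pvGetD_append_cons, pvGetD_append_cons]
    by_cases hcond : c = "#" ∧ ((P.length : Int), (d1.length : Int)) ∈ ex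
    · rw [show (if pvGet2 (P ++ (d1 ++ c :: cs) :: rest) P.length d1.length = "#"
            ∧ ((P.length : Int), (d1.length : Int)) ∈ ex
          then pvSet2 (P ++ (d1 ++ c :: cs) :: rest) P.length d1.length "-"
          else P ++ (d1 ++ c :: cs) :: rest)
          = P ++ (d1 ++ "-" :: cs) :: rest from by
        rw [if_pos (by rw [hg]; exact hcond), pvSet2, pvGetD_append_cons, pvSet_append_cons,
          pvSet_append_cons]]
      rw [show P ++ (d1 ++ "-" :: cs) :: rest = P ++ ((d1 ++ ["-"]) ++ cs) :: rest from by simp,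
        show d1.length + 1 = (d1 ++ ["-"]).length from by simp, ih]
      simp only [clearRowS, if_pos hcond]
      simp
    · rw [show (if pvGet2 (P ++ (d1 ++ c :: cs) :: rest) P.length d1.length = "#"
            ∧ ((P.length : Int), (d1.length : Int)) ∈ ex
          then pvSet2 (P ++ (d1 ++ c :: cs) :: rest) P.length d1.length "-"
          else P ++ (d1 ++ c :: cs) :: rest)
          = P ++ (d1 ++ c :: cs) :: rest from by rw [if_neg (by rw [hg]; exact hcond)]]
      rw [show P ++ (d1 ++ c :: cs) :: rest = P ++ ((d1 ++ [c]) ++ cs) :: rest from by simp,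
        show d1.length + 1 = (d1 ++ [c]).length from by simp, ih]
      simp only [clearRowS, if_neg hcond]
      simp

theorem clearA_outer (ex : List (Int × Int)) :
    ∀ (rs P : List (List String)),
      List.foldl (fun b i =>
          (List.range ((b.getD i []).length)).foldl (fun b j =>
            if pvGet2 b i j = "#" ∧ ((i : Int), (j : Int)) ∈ ex then pvSet2 b i j "-" else b) b)
        (P ++ rs) (List.range' P.length rs.length) =
      P ++ clearS ex P.length rs := by
  intro rs
  induction rs with
  | nil => intro P; simp [clearS]
  | cons r rs' ih =>
    intro P
    rw [show List.range' P.length (r :: rs').length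
          = P.length :: List.range' (P.length + 1) rs'.length from by
        rw [List.length_cons]; exact List.range'_succ, List.foldl_cons]
    rw [show (P ++ r :: rs').getD P.length [] = r from pvGetD_append_cons _ _ _ _,
      List.range_eq_range']
    have h1 := clearA_inner ex P rs' r []
    simp only [List.nil_append, List.length_nil] at h1
    rw [h1]
    rw [show P ++ clearRowS ex P.length 0 r :: rs'
        = (P ++ [clearRowS ex P.length 0 r]) ++ rs' from by simp]
    have ih' := ih (P ++ [clearRowS ex P.length 0 r])
    simp only [List.length_append, List.length_cons, List.length_nil] at ih'
    rw [ih']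
    simp [clearS]

theorem clearA_eq (ex : List (Int × Int)) (b : List (List String)) :
    clearA b ex = clearS ex 0 b := by
  unfold clearA
  have h := clearA_outer ex b []
  simp only [List.nil_append, List.length_nil] at h
  rw [List.range_eq_range']
  exact h

theorem clearRowB_eq (exS : PySem.Set (Int × Int)) (ex : List (Int × Int))
    (hmem : ∀ p : Int × Int, PySem.Set.contains exS p = true ↔ p ∈ ex) (i : Nat) :
    ∀ (row : List String) (j : Nat),
      (PySem.List.enumerate row (j : Int)).map (fun pc =>
        if pc.2 = "#" ∧ PySem.Set.contains exS ((i : Int), pc.1) = true then "-" else pc.2)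
      = clearRowS ex i j row := by
  intro row
  induction row with
  | nil => intro j; simp [clearRowS, PySem.List.enumerate_nil]
  | cons c cs ih =>
    intro j
    rw [PySem.List.enumerate_cons, List.map_cons,
      show (j : Int) + 1 = ((j + 1 : Nat) : Int) from by push_cast; ring, ih (j + 1)]
    simp only [clearRowS]
    congr 1
    by_cases hc : c = "#" ∧ ((i : Int), (j : Int)) ∈ ex
    · rw [if_pos ⟨hc.1, (hmem _).2 hc.2⟩, if_pos hc]
    · rw [if_neg (by rw [hmem ((i : Int), (j : Int))] at *; exact hc), if_neg hc]

theorem clearB_eq (exS : PySem.Set (Int × Int)) (ex : List (Int × Int))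
    (hmem : ∀ p : Int × Int, PySem.Set.contains exS p = true ↔ p ∈ ex)
    (nb : List (List String)) : clearB nb exS = clearS ex 0 nb := by
  unfold clearB
  rw [show (0 : Int) = ((0 : Nat) : Int) from rfl]
  have main : ∀ (rows : List (List String)) (i : Nat),
      (PySem.List.enumerate rows (i : Int)).map (fun pr =>
        (PySem.List.enumerate pr.2 0).map (fun pc =>
          if pc.2 = "#" ∧ PySem.Set.contains exS (pr.1, pc.1) = true then "-" else pc.2))
      = clearS ex i rows := by
    intro rows
    induction rows with
    | nil => intro i; simp [clearS, PySem.List.enumerate_nil]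
    | cons r rs ih =>
      intro i
      rw [PySem.List.enumerate_cons, List.map_cons,
        show (i : Int) + 1 = ((i + 1 : Nat) : Int) from by push_cast; ring, ih (i + 1)]
      simp only [clearS]
      congr 1
      rw [show (0 : Int) = ((0 : Nat) : Int) from rfl]
      exact clearRowB_eq exS ex hmem i r 0
  exact main nb 0

theorem clearRowS_len (ex : List (Int × Int)) (i : Nat) :
    ∀ (row : List String) (j : Nat), (clearRowS ex i j row).length = row.length := by
  intro row
  induction row with
  | nil => intro j; simp [clearRowS]
  | cons c cs ih => intro j; simp [clearRowS, ih]

theorem clearS_rect (ex : List (Int × Int)) (C : Nat) :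
    ∀ (rs : List (List String)) (i : Nat), (∀ r ∈ rs, r.length = C) →
      ∀ r ∈ clearS ex i rs, r.length = C := by
  intro rs
  induction rs with
  | nil => intro i _ r hr; simp [clearS] at hr
  | cons x xs ih =>
    intro i hrect r hr
    simp only [clearS, List.mem_cons] at hr
    rcases hr with hr | hr
    · rw [hr, clearRowS_len]
      exact hrect x List.mem_cons_self
    · exact ih (i + 1) (fun r hr => hrect r (List.mem_cons_of_mem _ hr)) r hr

/- ---------- the loop ---------- -/

theorem loop_eq : ∀ (f : Nat) (b : List (List String)) (C : Nat),
    (∀ r ∈ b, r.length = C) → loopA f b = loopB f b := by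
  intro f
  induction f with
  | zero => intro b C _; rfl
  | succ f ih =>
    intro b C hrect
    simp only [loopA, loopB]
    rw [check_eq b]
    by_cases h : unsettledB b = true
    · rw [if_pos h, if_pos h]
      cases b with
      | nil => exact absurd h (by decide)
      | cons r0 rest =>
        have hrect' : ∀ r ∈ rest, r.length = r0.length := by
          intro r hr
          rw [hrect r (List.mem_cons_of_mem _ hr), hrect r0 List.mem_cons_self]
        show loopA f (clearA (passA (r0 :: rest)).1 (passA (r0 :: rest)).2)
          = loopB f (clearB (fallB (r0 :: rest)).1 (fallB (r0 :: rest)).2)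
        rw [passA_eq r0 rest hrect', fallB_eq r0 rest hrect']
        have hmem : ∀ p : Int × Int,
            PySem.Set.contains (PySem.Set.ofList (boardSim 0 r0 rest).2) p = true
              ↔ p ∈ (boardSim 0 r0 rest).2 := by
          intro p
          rw [PySem.Set.contains_iff, PySem.Set.mem_ofList]
        rw [clearA_eq, clearB_eq _ _ hmem]
        apply ih _ C
        apply clearS_rect
        intro r hr
        rw [(boardSim_shape rest 0 r0 hrect').2 r hr]
        exact hrect r0 List.mem_cons_self
    · rw [if_neg h, if_neg h]

-- ===== VERDICT (by name: the statement is the Claim_ definition above) =====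
theorem solution_spec : Claim_equal_solution := by
  intro board _ hpre
  show solution board = solution_alt board
  rcases hpre with ⟨hrect, _⟩ | hset
  · exact loop_eq _ board _ hrect
  · -- the board is already settled: both loops return it after one check
    have hup : ¬ UP board := by
      rintro ⟨i, hi, j, hh, r, hr, hd⟩
      exact (hset i hi j (pvGet2_hash_lt hh) hh r hr).2 hd
    have hA : checkA board = false := by
      cases hcb : checkA board
      · rfl
      · exact absurd ((checkA_iff board).1 hcb) hup
    have hB : unsettledB board = false := by
      cases hcb : unsettledB board
      · rfl
      · exact absurd ((unsettledB_iff board).1 hcb) hup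
    unfold solution solution_alt
    rw [show board.length * (board.headD []).length + 2
        = (board.length * (board.headD []).length + 1) + 1 from rfl]
    simp only [loopA, loopB]
    rw [hA, hB]
    simp
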